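-- pv_equiv track=rewrite | github.com/kimhaegyeong/LawFirmAI | scripts/tools/analyze_scripts.py | classify_root_files
-- ===== SOURCE A (Python) =====
-- from typing import Dict, List, Tuple
--
-- def classify_root_files(files: List[str]) -> Dict[str, List[str]]:
--     """루트 레벨 파일들을 카테고리별로 분류"""
--     classification = {
--         "test": [],
--         "verify": [],
--         "check": [],
--         "monitor": [],
--         "analyze": [],
--         "create": [],
--         "assign": [],
--         "wait": [],
--         "migrate": [],
--         "setup": [],
--         "wrapper": [],
--         "other": []
--     }
--
--     for file in files:
--         name_lower = file.lower()
--
--         if name_lower.startswith("test_"):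
--             classification["test"].append(file)
--         elif name_lower.startswith("verify_"):
--             classification["verify"].append(file)
--         elif name_lower.startswith("check_"):
--             classification["check"].append(file)
--         elif name_lower.startswith("monitor_"):
--             classification["monitor"].append(file)
--         elif name_lower.startswith("analyze_"):
--             classification["analyze"].append(file)
--         elif name_lower.startswith("create_"):
--             classification["create"].append(file)
--         elif name_lower.startswith("assign_"):
--             classification["assign"].append(file)
--         elif name_lower.startswith("wait_"):
--             classification["wait"].append(file)
--         elif name_lower.startswith("migrate_"):
--             classification["migrate"].append(file)
--         elif name_lower.startswith("init_"):
--             classification["migrate"].append(file)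
--         elif name_lower.startswith("setup_"):
--             classification["setup"].append(file)
--         elif file.endswith((".ps1", ".sh")):
--             classification["wrapper"].append(file)
--         else:
--             classification["other"].append(file)
--
--     return {k: v for k, v in classification.items() if v}
-- ===== SOURCE B (Python) =====
-- from typing import Dict, List
--
-- _PREFIX_TABLE = [
--     ("test_", "test"),
--     ("verify_", "verify"),
--     ("check_", "check"),
--     ("monitor_", "monitor"),
--     ("analyze_", "analyze"),
--     ("create_", "create"),
--     ("assign_", "assign"),
--     ("wait_", "wait"),
--     ("migrate_", "migrate"),
--     ("init_", "migrate"),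
--     ("setup_", "setup"),
-- ]
--
-- _CATEGORIES = ["test", "verify", "check", "monitor", "analyze", "create",
--                "assign", "wait", "migrate", "setup", "wrapper", "other"]
--
--
-- def _category(file: str) -> str:
--     name_lower = file.lower()
--     for prefix, cat in _PREFIX_TABLE:
--         if name_lower.startswith(prefix):
--             return cat
--     if file.endswith((".ps1", ".sh")):
--         return "wrapper"
--     return "other"
--
--
-- def classify_root_files(files: List[str]) -> Dict[str, List[str]]:
--     cats = [_category(f) for f in files]
--     result = {}
--     for cat in _CATEGORIES:
--         matched = [f for f, c in zip(files, cats) if c == cat]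
--         if matched:
--             result[cat] = matched
--     return result
-- ===== Notes on version B (the rewrite author's own statement) =====
-- stated objective: idiomatic
-- what changed: Replaces the 12-way elif chain mutating a pre-seeded dict with a prefix->category table plus a per-file _category function, computes each file's category once, and builds the result by one zip-filter pass per category in the fixed key order (empty categories simply never inserted).
import Mathlib
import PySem

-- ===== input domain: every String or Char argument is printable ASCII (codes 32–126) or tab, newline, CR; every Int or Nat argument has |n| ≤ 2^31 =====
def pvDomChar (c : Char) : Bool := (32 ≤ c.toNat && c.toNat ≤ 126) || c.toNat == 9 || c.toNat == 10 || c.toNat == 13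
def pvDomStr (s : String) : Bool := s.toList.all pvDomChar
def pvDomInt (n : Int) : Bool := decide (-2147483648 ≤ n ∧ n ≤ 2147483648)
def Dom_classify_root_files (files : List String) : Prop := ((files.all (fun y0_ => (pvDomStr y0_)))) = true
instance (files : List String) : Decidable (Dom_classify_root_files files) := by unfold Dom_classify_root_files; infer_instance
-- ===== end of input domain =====

set_option maxHeartbeats 1000000


-- B replaces A's 12-way elif chain over a pre-seeded dict with a prefix→category table, a
-- per-file category function and one filter pass per category (idiomatic; same results).

-- ===== PORT A =====
-- A's pre-seeded classification dict keys, in order.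
def pvKeysA : List String :=
  ["test", "verify", "check", "monitor", "analyze", "create",
   "assign", "wait", "migrate", "setup", "wrapper", "other"]

-- A's loop body: lower the name, elif chain, append `file` to the chosen bucket.
def pvStepA (d : PySem.Dict String (List String)) (file : String) :
    PySem.Dict String (List String) :=
  let name_lower := PySem.Str.lower file
  if PySem.Str.startswith name_lower "test_" then d.modify "test" [] (· ++ [file])
  else if PySem.Str.startswith name_lower "verify_" then d.modify "verify" [] (· ++ [file])
  else if PySem.Str.startswith name_lower "check_" then d.modify "check" [] (· ++ [file])
  else if PySem.Str.startswith name_lower "monitor_" then d.modify "monitor" [] (· ++ [file])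
  else if PySem.Str.startswith name_lower "analyze_" then d.modify "analyze" [] (· ++ [file])
  else if PySem.Str.startswith name_lower "create_" then d.modify "create" [] (· ++ [file])
  else if PySem.Str.startswith name_lower "assign_" then d.modify "assign" [] (· ++ [file])
  else if PySem.Str.startswith name_lower "wait_" then d.modify "wait" [] (· ++ [file])
  else if PySem.Str.startswith name_lower "migrate_" then d.modify "migrate" [] (· ++ [file])
  else if PySem.Str.startswith name_lower "init_" then d.modify "migrate" [] (· ++ [file])
  else if PySem.Str.startswith name_lower "setup_" then d.modify "setup" [] (· ++ [file])
  else if PySem.Str.endswith file ".ps1" || PySem.Str.endswith file ".sh" then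
    d.modify "wrapper" [] (· ++ [file])
  else d.modify "other" [] (· ++ [file])

def classify_root_files (files : List String) : List (String × List String) :=
  let classification : PySem.Dict String (List String) :=
    PySem.Dict.ofList (pvKeysA.map (fun k => (k, ([] : List String))))
  let d := files.foldl pvStepA classification
  -- `{k: v for k, v in classification.items() if v}`
  d.items.filter (fun p => !p.2.isEmpty)

-- ===== PORT B =====
def pvPrefixTable : List (String × String) :=
  [("test_", "test"), ("verify_", "verify"), ("check_", "check"),
   ("monitor_", "monitor"), ("analyze_", "analyze"), ("create_", "create"),
   ("assign_", "assign"), ("wait_", "wait"), ("migrate_", "migrate"),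
   ("init_", "migrate"), ("setup_", "setup")]

def pvCategoriesB : List String :=
  ["test", "verify", "check", "monitor", "analyze", "create",
   "assign", "wait", "migrate", "setup", "wrapper", "other"]

-- the `for prefix, cat in _PREFIX_TABLE: if … return cat` scan
def pvScanTable (name_lower : String) : List (String × String) → Option String
  | [] => none
  | (pre, cat) :: rest =>
    if PySem.Str.startswith name_lower pre then some cat else pvScanTable name_lower rest

def pvCategory (file : String) : String :=
  let name_lower := PySem.Str.lower file
  match pvScanTable name_lower pvPrefixTable with
  | some cat => cat
  | none =>
    if PySem.Str.endswith file ".ps1" || PySem.Str.endswith file ".sh" then "wrapper"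
    else "other"

def classify_root_files_alt (files : List String) : List (String × List String) :=
  let cats := files.map pvCategory
  pvCategoriesB.foldl
    (fun result cat =>
      let matched := ((files.zip cats).filter (fun p => p.2 == cat)).map (·.1)
      if !matched.isEmpty then result ++ [(cat, matched)] else result)
    []

-- ===== PRECONDITION & SPEC =====
def Spec_classify_root_files (files : List String) (out : List (String × List String)) : Prop := out = classify_root_files_alt files
instance (files : List String) (out : List (String × List String)) : Decidable (Spec_classify_root_files files out) := by unfold Spec_classify_root_files; infer_instance

-- ===== CLAIM (what is proved, stated in full; the proofs are below) =====
def Claim_equal_classify_root_files : Prop := ∀ (files : List String), Dom_classify_root_files files → Spec_classify_root_files files (classify_root_files files)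

-- ===== LEMMAS AND PROOFS =====

-- A's branch at `file` is exactly "append file to the bucket B's category function picks".
theorem pvStepA_eq_modify (d : PySem.Dict String (List String)) (file : String) :
    pvStepA d file = d.modify (pvCategory file) [] (· ++ [file]) := by
  unfold pvStepA pvCategory pvPrefixTable
  simp only [pvScanTable]
  by_cases h1 : PySem.Str.startswith (PySem.Str.lower file) "test_" = true
  · simp only [h1, reduceIte]
  simp only [Bool.not_eq_true] at h1
  simp only [h1, Bool.false_eq_true, reduceIte]
  by_cases h2 : PySem.Str.startswith (PySem.Str.lower file) "verify_" = true
  · simp only [h2, reduceIte]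
  simp only [Bool.not_eq_true] at h2
  simp only [h2, Bool.false_eq_true, reduceIte]
  by_cases h3 : PySem.Str.startswith (PySem.Str.lower file) "check_" = true
  · simp only [h3, reduceIte]
  simp only [Bool.not_eq_true] at h3
  simp only [h3, Bool.false_eq_true, reduceIte]
  by_cases h4 : PySem.Str.startswith (PySem.Str.lower file) "monitor_" = true
  · simp only [h4, reduceIte]
  simp only [Bool.not_eq_true] at h4
  simp only [h4, Bool.false_eq_true, reduceIte]
  by_cases h5 : PySem.Str.startswith (PySem.Str.lower file) "analyze_" = true
  · simp only [h5, reduceIte]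
  simp only [Bool.not_eq_true] at h5
  simp only [h5, Bool.false_eq_true, reduceIte]
  by_cases h6 : PySem.Str.startswith (PySem.Str.lower file) "create_" = true
  · simp only [h6, reduceIte]
  simp only [Bool.not_eq_true] at h6
  simp only [h6, Bool.false_eq_true, reduceIte]
  by_cases h7 : PySem.Str.startswith (PySem.Str.lower file) "assign_" = true
  · simp only [h7, reduceIte]
  simp only [Bool.not_eq_true] at h7
  simp only [h7, Bool.false_eq_true, reduceIte]
  by_cases h8 : PySem.Str.startswith (PySem.Str.lower file) "wait_" = true
  · simp only [h8, reduceIte]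
  simp only [Bool.not_eq_true] at h8
  simp only [h8, Bool.false_eq_true, reduceIte]
  by_cases h9 : PySem.Str.startswith (PySem.Str.lower file) "migrate_" = true
  · simp only [h9, reduceIte]
  simp only [Bool.not_eq_true] at h9
  simp only [h9, Bool.false_eq_true, reduceIte]
  by_cases h10 : PySem.Str.startswith (PySem.Str.lower file) "init_" = true
  · simp only [h10, reduceIte]
  simp only [Bool.not_eq_true] at h10
  simp only [h10, Bool.false_eq_true, reduceIte]
  by_cases h11 : PySem.Str.startswith (PySem.Str.lower file) "setup_" = true
  · simp only [h11, reduceIte]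
  simp only [Bool.not_eq_true] at h11
  simp only [h11, Bool.false_eq_true, reduceIte]
  by_cases h12 : (PySem.Str.endswith file ".ps1" || PySem.Str.endswith file ".sh") = true
  · simp only [h12, reduceIte]
  simp only [Bool.not_eq_true] at h12
  simp only [h12, Bool.false_eq_true, reduceIte]

theorem pvScanTable_mem (nl : String) (t : List (String × String)) (c : String)
    (h : pvScanTable nl t = some c) : c ∈ t.map (·.2) := by
  induction t with
  | nil => simp [pvScanTable] at h
  | cons p rest ih =>
    obtain ⟨pre, cat⟩ := p
    simp only [pvScanTable] at h
    by_cases hs : PySem.Str.startswith nl pre = true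
    · rw [if_pos hs] at h
      simp at h
      simp [h]
    · rw [if_neg hs] at h
      simpa using Or.inr (ih h)

theorem pvCategory_mem_keys (file : String) : pvCategory file ∈ pvKeysA := by
  unfold pvCategory
  cases h : pvScanTable (PySem.Str.lower file) pvPrefixTable with
  | some c =>
    have hm := pvScanTable_mem _ _ _ h
    simp only [h]
    simp only [pvPrefixTable, List.map] at hm
    fin_cases hm <;> decide
  | none =>
    simp only [h]
    by_cases he : (PySem.Str.endswith file ".ps1" || PySem.Str.endswith file ".sh") = true
    · simp only [he, reduceIte]
      decide
    · simp only [Bool.not_eq_true] at he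
      simp only [he, Bool.false_eq_true, reduceIte]
      decide

theorem pvMkNil_getD (ks : List String) (k : String) :
    (PySem.Dict.mk (ks.map (fun k => (k, ([] : List String))))).getD k [] = [] := by
  induction ks with
  | nil => rfl
  | cons a rest ih =>
    simp only [List.map, PySem.Dict.getD_eq_get?_getD, PySem.Dict.get?_mk_cons]
    by_cases h : (a == k) = true
    · simp [h]
    · simp only [Bool.not_eq_true] at h
      simp only [h, Bool.false_eq_true, reduceIte]
      simpa [PySem.Dict.getD_eq_get?_getD] using ih

theorem pvInit_getD (k : String) :
    (PySem.Dict.ofList (pvKeysA.map (fun k => (k, ([] : List String))))).getD k [] = [] := by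
  have h : PySem.Dict.ofList (pvKeysA.map (fun k => (k, ([] : List String))))
      = PySem.Dict.mk (pvKeysA.map (fun k => (k, ([] : List String)))) := by decide
  rw [h]
  exact pvMkNil_getD pvKeysA k

theorem pvFold_getD (files : List String) (k : String) :
    (files.foldl pvStepA
        (PySem.Dict.ofList (pvKeysA.map (fun k => (k, ([] : List String)))))).getD k []
      = files.filter (fun f => pvCategory f == k) := by
  have h1 : files.foldl pvStepA
        (PySem.Dict.ofList (pvKeysA.map (fun k => (k, ([] : List String)))))
      = (files.map (fun f => (pvCategory f, f))).foldl
          (fun d p => d.modify p.1 [] (· ++ [p.2]))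
          (PySem.Dict.ofList (pvKeysA.map (fun k => (k, ([] : List String))))) := by
    rw [List.foldl_map]
    apply PySem.List.foldl_congr_mem
    intro acc x _
    exact pvStepA_eq_modify acc x
  rw [h1, PySem.Dict.getD_foldl_modify_append, pvInit_getD]
  rw [List.filter_map]
  simp [Function.comp_def, List.map_map]

theorem pvFold_keys (files : List String) :
    (files.foldl pvStepA
        (PySem.Dict.ofList (pvKeysA.map (fun k => (k, ([] : List String)))))).keys
      = pvKeysA := by
  have h1 : files.foldl pvStepA
        (PySem.Dict.ofList (pvKeysA.map (fun k => (k, ([] : List String)))))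
      = files.foldl (fun d f => d.modify (pvCategory f) [] (· ++ [f]))
          (PySem.Dict.ofList (pvKeysA.map (fun k => (k, ([] : List String))))) := by
    apply PySem.List.foldl_congr_mem
    intro acc x _
    exact pvStepA_eq_modify acc x
  rw [h1, PySem.Dict.keys_foldl_modify_key]
  have hk : (PySem.Dict.ofList (pvKeysA.map (fun k => (k, ([] : List String))))).keys
      = pvKeysA := by decide
  rw [hk, PySem.Set.update_eq_append_filter]
  have : (PySem.Set.ofList (files.map pvCategory)).filter
      (fun y => !(PySem.Set.contains pvKeysA y)) = [] := by
    apply List.filter_eq_nil_iff.mpr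
    intro y hy
    have hy' : y ∈ files.map pvCategory := (PySem.List.mem_dedup _ _).mp hy
    obtain ⟨f, _, rfl⟩ := List.mem_map.mp hy'
    simp [pvCategory_mem_keys]
  rw [this, List.append_nil]

theorem pvFold_nodup (files : List String) :
    (files.foldl pvStepA
        (PySem.Dict.ofList (pvKeysA.map (fun k => (k, ([] : List String)))))).keys.Nodup := by
  rw [pvFold_keys]; decide

theorem pvA_items (files : List String) :
    classify_root_files files
      = (pvKeysA.map (fun k => (k, files.filter (fun f => pvCategory f == k)))).filter
          (fun p => !p.2.isEmpty) := by
  simp only [classify_root_files]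
  rw [PySem.Dict.items_eq_map_keys _ (pvFold_nodup files) []]
  rw [pvFold_keys]
  congr 1
  exact List.map_congr_left (fun k _ => by rw [pvFold_getD])

theorem pvZipFilter (files : List String) (cat : String) :
    ((files.zip (files.map pvCategory)).filter (fun p => p.2 == cat)).map (·.1)
      = files.filter (fun f => pvCategory f == cat) := by
  induction files with
  | nil => rfl
  | cons f fs ih =>
    simp only [List.map, List.zip_cons_cons, List.filter]
    by_cases h : (pvCategory f == cat) = true
    · simp only [h, List.map, ih]
    · simp only [Bool.not_eq_true] at h
      simp only [h, ih]

theorem pvB_items (files : List String) :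
    classify_root_files_alt files
      = (pvKeysA.map (fun k => (k, files.filter (fun f => pvCategory f == k)))).filter
          (fun p => !p.2.isEmpty) := by
  unfold classify_root_files_alt
  simp only [pvZipFilter]
  rw [PySem.List.foldl_append_if
      (fun cat => !(files.filter (fun f => pvCategory f == cat)).isEmpty)
      (fun cat => (cat, files.filter (fun f => pvCategory f == cat)))]
  rw [List.filter_map]
  simp [Function.comp_def, pvCategoriesB, pvKeysA]

-- ===== VERDICT (by name: the statement is the Claim_ definition above) =====
theorem classify_root_files_spec : Claim_equal_classify_root_files := by
  intro files _
  unfold Spec_classify_root_files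
  rw [pvA_items, pvB_items]
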